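-- pv_equiv track=rewrite | github.com/Rosthouse/AdventOfCode2019 | challenge4_part1.py | verify_pw
-- ===== SOURCE A (Python) =====
-- def verify_pw(pw: int) -> bool:
--     elements: [int] = list(map(lambda digit: int(digit), str(pw)))
--
--     double: bool = False
--     ascending: bool = True
--     for i in range(0, len(elements)-1, 1):
--         if elements[i] == elements[i+1]:
--             double = True
--         if elements[i] > elements[i+1]:
--             ascending = False
--
--     return double and ascending
-- ===== SOURCE B (Python) =====
-- def verify_pw(pw: int) -> bool:
--     digits = [int(c) for c in str(pw)]
--     ascending = digits == sorted(digits)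
--     double = any(a == b for a, b in zip(digits, digits[1:]))
--     return double and ascending
-- ===== Notes on version B (the rewrite author's own statement) =====
-- stated objective: idiomatic
-- what changed: Replaces the single index loop maintaining two flags by a sorted-copy comparison for the monotonicity test and an any() over adjacent zip pairs for the doubled-digit test.
import Mathlib
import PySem

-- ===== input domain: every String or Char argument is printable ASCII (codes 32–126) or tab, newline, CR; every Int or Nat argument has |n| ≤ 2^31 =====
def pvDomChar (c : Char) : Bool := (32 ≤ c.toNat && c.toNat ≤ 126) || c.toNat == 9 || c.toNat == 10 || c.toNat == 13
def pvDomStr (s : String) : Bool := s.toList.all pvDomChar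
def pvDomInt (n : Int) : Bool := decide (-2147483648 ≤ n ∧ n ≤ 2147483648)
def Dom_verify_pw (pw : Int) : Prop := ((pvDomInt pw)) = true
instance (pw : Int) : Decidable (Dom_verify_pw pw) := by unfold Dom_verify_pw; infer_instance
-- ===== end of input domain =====

-- B replaces A's index loop with two flags by sorted-copy comparison plus any() over zip pairs (idiomatic, not faster).

-- ===== PORT A =====
-- int(c) per character; getD 0 is unreachable under Pre_ (every char of str(pw) is a digit for pw ≥ 0)
def verify_pw (pw : Int) : Bool :=
  let elements : List Int :=
    (PySem.Int.toStr pw).toList.map (fun c => (PySem.Int.ofStr? (String.ofList [c])).getD 0)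
  let st :=
    (PySem.List.pyRange 0 ((elements.length : Int) - 1) 1).foldl
      (fun (st : Bool × Bool) i =>
        (if PySem.List.pyGetD elements i 0 == PySem.List.pyGetD elements (i + 1) 0 then true else st.1,
         if PySem.List.pyGetD elements i 0 > PySem.List.pyGetD elements (i + 1) 0 then false else st.2))
      (false, true)
  st.1 && st.2

-- ===== PORT B =====
def verify_pw_alt (pw : Int) : Bool :=
  let digits : List Int :=
    (PySem.Int.toStr pw).toList.map (fun c => (PySem.Int.ofStr? (String.ofList [c])).getD 0)
  let ascending : Bool := digits == PySem.List.sorted digits (fun x => x) false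
  let double : Bool := (digits.zip (PySem.List.slice digits (some 1) none)).any (fun p => p.1 == p.2)
  double && ascending

-- ===== PRECONDITION & SPEC =====
-- Pre_ excludes negative pw, on which both Pythons raise ValueError (int('-') while mapping over str(pw)).
def Pre_verify_pw (pw : Int) : Prop := 0 ≤ pw
instance (pw : Int) : Decidable (Pre_verify_pw pw) := by unfold Pre_verify_pw; infer_instance
def pvWitness_verify_pw : Int := 122345

def Spec_verify_pw (pw : Int) (out : Bool) : Prop := out = verify_pw_alt pw
instance (pw : Int) (out : Bool) : Decidable (Spec_verify_pw pw out) := by unfold Spec_verify_pw; infer_instance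

-- ===== CLAIM (what is proved, stated in full; the proofs are below) =====
def Claim_equal_verify_pw : Prop := ∀ (pw : Int), Dom_verify_pw pw → Pre_verify_pw pw → Spec_verify_pw pw (verify_pw pw)

-- ===== LEMMAS AND PROOFS =====

-- the zip of a list with its tail has length (length - 1)
theorem pv_zip_tail_length {α : Type} (l : List α) :
    (l.zip l.tail).length = l.length - 1 := by
  cases l with
  | nil => simp
  | cons a t => simp [List.length_zip]

-- A's fold over the adjacent-pair list, characterised componentwise
theorem pv_pairfold (z : List (Int × Int)) (st : Bool × Bool) :
    z.foldl (fun (st : Bool × Bool) p =>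
        (if p.1 == p.2 then true else st.1, if p.1 > p.2 then false else st.2)) st
      = (st.1 || z.any (fun p => p.1 == p.2),
         st.2 && z.all (fun p => decide (p.1 ≤ p.2))) := by
  induction z generalizing st with
  | nil => simp
  | cons p z ih =>
      rw [List.foldl_cons, ih]
      refine Prod.ext ?_ ?_
      · cases hb : (p.1 == p.2) <;> simp [hb]
      · by_cases h2 : p.1 > p.2
        · simp [h2, show ¬(p.1 ≤ p.2) from not_le.mpr h2]
        · simp [h2, not_lt.mp h2]

-- adjacent-pair "all ≤" is IsChain (· ≤ ·)
theorem pv_allAdj (l : List Int) :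
    (l.zip l.tail).all (fun p => decide (p.1 ≤ p.2)) = true ↔ l.IsChain (· ≤ ·) := by
  induction l with
  | nil => simp
  | cons a t ih =>
      cases t with
      | nil => simp [List.isChain_singleton a]
      | cons b t' =>
          simp only [List.tail_cons, List.zip_cons_cons, List.all_cons, List.isChain_cons_cons,
            Bool.and_eq_true, decide_eq_true_eq]
          exact and_congr Iff.rfl ih

-- "digits == sorted(digits)" is exactly IsChain (· ≤ ·)
theorem pv_sorted_eq_iff (l : List Int) :
    (l == PySem.List.sorted l (fun x => x) false) = true ↔ l.IsChain (· ≤ ·) := by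
  rw [beq_iff_eq, List.isChain_iff_pairwise]
  constructor
  · intro h
    have := PySem.List.sorted_pairwise (xs := l) (key := fun x => x)
    rw [← h] at this
    exact this
  · intro h
    exact (PySem.List.sorted_eq_self_of_pairwise l (fun x => x) h).symm

-- the two boolean monotonicity tests agree
theorem pv_asc_eq (l : List Int) :
    (l == PySem.List.sorted l (fun x => x) false)
      = (l.zip l.tail).all (fun p => decide (p.1 ≤ p.2)) := by
  by_cases h : l.IsChain (· ≤ ·)
  · rw [(pv_sorted_eq_iff l).mpr h, (pv_allAdj l).mpr h]
  · have h1 : (l == PySem.List.sorted l (fun x => x) false) = false := by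
      cases hb : (l == PySem.List.sorted l (fun x => x) false)
      · rfl
      · exact absurd ((pv_sorted_eq_iff l).mp hb) h
    have h2 : (l.zip l.tail).all (fun p => decide (p.1 ≤ p.2)) = false := by
      cases hb : (l.zip l.tail).all (fun p => decide (p.1 ≤ p.2))
      · rfl
      · exact absurd ((pv_allAdj l).mp hb) h
    rw [h1, h2]

-- the core equivalence, for an arbitrary digit list
theorem pv_core (l : List Int) :
    (((PySem.List.pyRange 0 ((l.length : Int) - 1) 1).foldl
        (fun (st : Bool × Bool) i =>
          (if PySem.List.pyGetD l i 0 == PySem.List.pyGetD l (i + 1) 0 then true else st.1,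
           if PySem.List.pyGetD l i 0 > PySem.List.pyGetD l (i + 1) 0 then false else st.2))
        (false, true)).1 &&
     ((PySem.List.pyRange 0 ((l.length : Int) - 1) 1).foldl
        (fun (st : Bool × Bool) i =>
          (if PySem.List.pyGetD l i 0 == PySem.List.pyGetD l (i + 1) 0 then true else st.1,
           if PySem.List.pyGetD l i 0 > PySem.List.pyGetD l (i + 1) 0 then false else st.2))
        (false, true)).2)
    = ((l.zip (PySem.List.slice l (some 1) none)).any (fun p => p.1 == p.2)
        && (l == PySem.List.sorted l (fun x => x) false)) := by
  rw [PySem.List.slice_from_one]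
  cases l with
  | nil => decide
  | cons a t =>
    set l := a :: t with hl
    set z := l.zip l.tail with hz
    have hzlen : z.length = l.length - 1 := pv_zip_tail_length l
    have hlpos : 1 ≤ l.length := by rw [hl]; simp
    have hlen : ((l.length : Int) - 1) = (z.length : Int) := by
      rw [hzlen]; omega
    rw [hlen]
    have hcongr : ∀ (acc : Bool × Bool), ∀ i ∈ PySem.List.pyRange 0 (z.length : Int) 1,
        (fun (st : Bool × Bool) i =>
          (if PySem.List.pyGetD l i 0 == PySem.List.pyGetD l (i + 1) 0 then true else st.1,
           if PySem.List.pyGetD l i 0 > PySem.List.pyGetD l (i + 1) 0 then false else st.2)) acc i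
        = (fun (st : Bool × Bool) j =>
            ((fun (st : Bool × Bool) (p : Int × Int) =>
              (if p.1 == p.2 then true else st.1, if p.1 > p.2 then false else st.2))
              st (PySem.List.pyGetD z j (0, 0)))) acc i := by
      intro acc i hi
      rw [PySem.List.mem_pyRange_one] at hi
      obtain ⟨h0, h1⟩ := hi
      have hiz : i.toNat < z.length := by omega
      have hil : i.toNat < l.length := by omega
      have hil1 : i.toNat + 1 < l.length := by omega
      have e1 : PySem.List.pyGetD z i (0, 0) = z[i.toNat] :=
        PySem.List.pyGetD_eq_getElem z (0, 0) h0 (by exact_mod_cast h1)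
      have e2 : PySem.List.pyGetD l i 0 = l[i.toNat] :=
        PySem.List.pyGetD_eq_getElem l 0 h0 (by exact_mod_cast (by omega : i < (l.length : Int)))
      have e3 : PySem.List.pyGetD l (i + 1) 0 = l[i.toNat + 1] := by
        have e := PySem.List.pyGetD_eq_getElem l (i := i + 1) 0 (by omega)
          (by exact_mod_cast (by omega : i + 1 < (l.length : Int)))
        have ht : (i + 1).toNat = i.toNat + 1 := by omega
        simp only [ht] at e
        exact e
      have ez : z[i.toNat]'hiz = (l[i.toNat]'hil, l[i.toNat + 1]'hil1) := by
        simp only [hz, List.getElem_zip, List.getElem_tail]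
      simp only [e1, e2, e3, ez]
    rw [PySem.List.foldl_congr_mem _ _ _ _ hcongr]
    rw [PySem.List.foldl_pyRange_zero_pyGetD' z (0, 0)
      (fun (st : Bool × Bool) (p : Int × Int) =>
        (if p.1 == p.2 then true else st.1, if p.1 > p.2 then false else st.2)) (false, true)]
    rw [pv_pairfold]
    rw [pv_asc_eq, hz]
    simp

-- ===== VERDICT (by name: the statement is the Claim_ definition above) =====
theorem verify_pw_spec : Claim_equal_verify_pw := by
  intro pw _ _
  unfold Spec_verify_pw verify_pw verify_pw_alt
  simpa using pv_core ((PySem.Int.toStr pw).toList.map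
    (fun c => (PySem.Int.ofStr? (String.ofList [c])).getD 0))
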